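-- pv_equiv track=rewrite | github.com/cl1sman/SaberesPython | Courses/Alg-Prog/Exercícios/Aula 12/12.10.0.py | alt_b
-- ===== SOURCE A (Python) =====
-- def alt_b(matriz):
--     city_more_entradas = []
--     quant_entradas = 0
--     for city in range(len(matriz)):
--         soma_entradas = 0
--         for linhas in matriz:
--             soma_entradas += linhas[city]
--         if soma_entradas == quant_entradas:
--             city_more_entradas.append("City {}".format(city))
--         elif soma_entradas > quant_entradas:
--             city_more_entradas.clear()
--     return city_more_entradas
-- ===== SOURCE B (Python) =====
-- def alt_b(matriz):
--     n = len(matriz)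
--     sums = [sum(row[c] for row in matriz) for c in range(n)]
--     piv = -1
--     for c, s in enumerate(sums):
--         if s > 0:
--             piv = c
--     return ["City {}".format(c) for c in range(piv + 1, n) if sums[c] == 0]
-- ===== Notes on version B (the rewrite author's own statement) =====
-- stated objective: alternative
-- what changed: Replaces A's single loop with a clear-on-positive running accumulator by three separate passes: compute all column sums, find the last column with positive sum (pivot), then filter the zero-sum columns after the pivot.
import Mathlib
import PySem

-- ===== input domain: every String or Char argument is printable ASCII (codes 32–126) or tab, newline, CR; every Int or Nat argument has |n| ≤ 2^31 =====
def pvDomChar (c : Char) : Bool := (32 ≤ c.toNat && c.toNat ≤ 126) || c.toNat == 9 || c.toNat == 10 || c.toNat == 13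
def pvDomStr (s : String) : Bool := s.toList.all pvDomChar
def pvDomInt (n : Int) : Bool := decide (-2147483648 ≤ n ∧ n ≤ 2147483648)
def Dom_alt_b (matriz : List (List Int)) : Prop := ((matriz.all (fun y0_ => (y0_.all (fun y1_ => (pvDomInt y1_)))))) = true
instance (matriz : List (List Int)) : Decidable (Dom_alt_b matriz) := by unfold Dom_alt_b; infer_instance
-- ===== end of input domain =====

-- B replaces A's running clear-on-positive accumulator with a pivot search (last column with
-- positive sum) followed by a single filter pass — a different decomposition, not faster.

-- column sum 'soma_entradas += linhas[city]' / 'sum(row[c] for row in matriz)': identical inner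
-- loop in both Pythons, shared here
def colSum (matriz : List (List Int)) (city : Int) : Int :=
  matriz.foldl (fun s linhas => s + PySem.List.pyGetD linhas city 0) 0

-- ===== PORT A =====
def alt_b (matriz : List (List Int)) : List String :=
  (PySem.List.pyRange 0 matriz.length 1).foldl
    (fun acc city =>
      let soma := colSum matriz city
      if soma = 0 then acc ++ ["City " ++ PySem.Int.toStr city]
      else if soma > 0 then []
      else acc) []

-- ===== PORT B =====
-- 'piv = -1; for c, s in enumerate(sums): if s > 0: piv = c'
def pivOf (sums : List Int) : Int :=
  (PySem.List.enumerate sums 0).foldl (fun p cs => if cs.2 > 0 then cs.1 else p) (-1)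

def alt_b_alt (matriz : List (List Int)) : List String :=
  let n : Int := matriz.length
  let sums := (PySem.List.pyRange 0 n 1).map (colSum matriz)
  let piv := pivOf sums
  (PySem.List.pyRange (piv + 1) n 1).foldl
    (fun acc c =>
      if PySem.List.pyGetD sums c 0 = 0 then acc ++ ["City " ++ PySem.Int.toStr c] else acc) []

-- ===== PRECONDITION & SPEC =====
-- Pre_ excludes exactly the inputs where Python A raises IndexError: some row shorter than the
-- number of rows (A indexes every row at columns 0..len(matriz)-1).
def Pre_alt_b (matriz : List (List Int)) : Prop :=
  ∀ linhas ∈ matriz, matriz.length ≤ linhas.length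
instance (matriz : List (List Int)) : Decidable (Pre_alt_b matriz) := by
  unfold Pre_alt_b; infer_instance
def pvWitness_alt_b : List (List Int) := [[1, 0], [-1, 0]]
def Spec_alt_b (matriz : List (List Int)) (out : List String) : Prop := out = alt_b_alt matriz
instance (matriz : List (List Int)) (out : List String) : Decidable (Spec_alt_b matriz out) := by unfold Spec_alt_b; infer_instance

-- ===== CLAIM (what is proved, stated in full; the proofs are below) =====
def Claim_equal_alt_b : Prop := ∀ (matriz : List (List Int)), Dom_alt_b matriz → Pre_alt_b matriz → Spec_alt_b matriz (alt_b matriz)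

-- ===== LEMMAS AND PROOFS =====

-- the two loop bodies, abstracted over the column-sum function / sums list
def aBody (S : Int → Int) (acc : List String) (city : Int) : List String :=
  if S city = 0 then acc ++ ["City " ++ PySem.Int.toStr city]
  else if S city > 0 then []
  else acc

def bBody (sums : List Int) (acc : List String) (c : Int) : List String :=
  if PySem.List.pyGetD sums c 0 = 0 then acc ++ ["City " ++ PySem.Int.toStr c] else acc

def sumsL (S : Int → Int) (n : Nat) : List Int := (PySem.List.pyRange 0 n 1).map S

lemma sumsL_succ (S : Int → Int) (n : Nat) :
    sumsL S (n + 1) = sumsL S n ++ [S n] := by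
  unfold sumsL
  have : ((n + 1 : Nat) : Int) = (n : Int) + 1 := by push_cast; ring
  rw [this, PySem.List.pyRange_one_succ_right (by positivity), List.map_append]
  simp

lemma length_sumsL (S : Int → Int) (n : Nat) : (sumsL S n).length = n := by
  unfold sumsL
  simp [PySem.List.length_pyRange_one]

lemma pivOf_append_singleton (l : List Int) (x : Int) :
    pivOf (l ++ [x]) = if x > 0 then (l.length : Int) else pivOf l := by
  unfold pivOf
  rw [PySem.List.enumerate_append, List.foldl_append]
  simp [PySem.List.enumerate_cons]

lemma pivOf_sumsL_lt (S : Int → Int) (n : Nat) :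
    -1 ≤ pivOf (sumsL S n) ∧ pivOf (sumsL S n) < n := by
  induction n with
  | zero => simp [sumsL, pivOf, PySem.List.enumerate_nil]
  | succ n ih =>
    rw [sumsL_succ, pivOf_append_singleton, length_sumsL]
    split_ifs <;> push_cast <;> omega

lemma pyGetD_sumsL_nat (S : Int → Int) (n k : Nat) (hk : k < n) :
    PySem.List.pyGetD (sumsL S n) k 0 = S k := by
  unfold sumsL
  exact PySem.List.pyGetD_map_pyRange S n k 0 hk


lemma pyGetD_append_left (l l' : List Int) (x : Int) (h0 : 0 ≤ x) (h : x < (l.length : Int)) :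
    PySem.List.pyGetD (l ++ l') x 0 = PySem.List.pyGetD l x 0 := by
  rw [PySem.List.pyGetD_eq_getElem (l ++ l') 0 h0 (by simp; omega),
      PySem.List.pyGetD_eq_getElem l 0 h0 h,
      List.getElem_append_left]

lemma main_lemma (S : Int → Int) (n : Nat) :
    (PySem.List.pyRange 0 n 1).foldl (aBody S) [] =
      (PySem.List.pyRange (pivOf (sumsL S n) + 1) n 1).foldl (bBody (sumsL S n)) [] := by
  induction n with
  | zero =>
    have h0 : sumsL S 0 = [] := by
      simp [sumsL, PySem.List.pyRange_one_eq_nil (le_refl (0 : Int))]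
    have h1 : pivOf ([] : List Int) = -1 := by
      simp [pivOf, PySem.List.enumerate_nil]
    rw [h0, h1]
    simp [PySem.List.pyRange_one_eq_nil (le_refl (0 : Int))]
  | succ n ih =>
    obtain ⟨hlo, hhi⟩ := pivOf_sumsL_lt S n
    have hcast : ((n + 1 : Nat) : Int) = (n : Int) + 1 := by push_cast; ring
    rw [hcast, PySem.List.pyRange_one_succ_right (by positivity), List.foldl_append,
      sumsL_succ, pivOf_append_singleton, length_sumsL]
    by_cases hpos : S n > 0
    · -- positive column sum: A clears, B's pivot becomes n so the filter range is empty
      rw [if_pos hpos, PySem.List.pyRange_one_eq_nil (le_refl ((n : Int) + 1))]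
      have hne : S (n : Int) ≠ 0 := by omega
      simp [aBody, hne, hpos]
    · -- nonpositive: pivot unchanged; B's range gains the single new index n
      rw [if_neg hpos]
      have hgetn : PySem.List.pyGetD (sumsL S n ++ [S (n : Int)]) ((n : Nat) : Int) 0 = S n := by
        rw [← sumsL_succ]
        exact pyGetD_sumsL_nat S (n + 1) n (by omega)
      rw [PySem.List.pyRange_one_succ_right (by omega), List.foldl_append]
      have hinner :
          (PySem.List.pyRange (pivOf (sumsL S n) + 1) n 1).foldl (bBody (sumsL S n ++ [S (n : Int)])) [] =
          (PySem.List.pyRange (pivOf (sumsL S n) + 1) n 1).foldl (bBody (sumsL S n)) [] := by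
        apply PySem.List.foldl_congr_mem
        intro acc x hx
        rw [PySem.List.mem_pyRange_one] at hx
        unfold bBody
        rw [pyGetD_append_left _ _ _ (by omega) (by rw [length_sumsL]; omega)]
      rw [hinner, ← ih]
      simp only [List.foldl_cons, List.foldl_nil]
      unfold aBody bBody
      rw [hgetn]
      by_cases hz : S (n : Int) = 0
      · simp [hz]
      · simp [hz, hpos]

-- ===== VERDICT (by name: the statement is the Claim_ definition above) =====
theorem alt_b_spec : Claim_equal_alt_b := by
  intro matriz _ _
  unfold Spec_alt_b alt_b alt_b_alt
  have := main_lemma (colSum matriz) matriz.length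
  unfold aBody bBody sumsL at this
  simpa using this
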